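-- pv_equiv track=rewrite | github.com/pedro-cfg/HDB3-chat | main.py | hdb3_encode
-- ===== SOURCE A (Python) =====
-- def hdb3_encode(bits):
--     encoded_bits = []
--     last_polarity = '-'
--     one_parity = 0
--     consecutive_zeros = 0
--
--     for bit in bits:
--         if bit == '1':
--             consecutive_zeros = 0
--             one_parity = (one_parity + 1) % 2
--             if last_polarity == '+':
--                 encoded_bits.append('-')
--                 last_polarity = '-'
--             else:
--                 encoded_bits.append('+')
--                 last_polarity = '+'
--         else:
--             consecutive_zeros += 1
--
--             if consecutive_zeros == 4:
--                 if one_parity == 1: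
--                     if last_polarity == '+':
--                         encoded_bits.append('+')
--                     else:
--                         encoded_bits.append('-')
--                 else:
--                     if last_polarity == '+':
--                         encoded_bits.pop()
--                         encoded_bits.pop()
--                         encoded_bits.pop()
--                         encoded_bits.extend(['-', '0', '0', '-'])
--                         last_polarity = '-'
--                     else:
--                         encoded_bits.pop()
--                         encoded_bits.pop()
--                         encoded_bits.pop()
--                         encoded_bits.extend(['+', '0', '0', '+'])
--                         last_polarity = '+'
--                 one_parity = 0;
--                 consecutive_zeros = 0
--             else:
--                 encoded_bits.append('0')
--
--     return encoded_bits
-- ===== SOURCE B (Python) =====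
-- def hdb3_encode(bits):
--     out = []
--     last_polarity = '-'
--     one_parity = 0
--     pending = 0
--     for bit in bits:
--         if bit == '1':
--             out.extend(['0'] * pending)
--             pending = 0
--             one_parity = 1 - one_parity
--             pulse = '-' if last_polarity == '+' else '+'
--             out.append(pulse)
--             last_polarity = pulse
--         else:
--             pending += 1
--             if pending == 4:
--                 if one_parity == 1:
--                     out.extend(['0', '0', '0', last_polarity])
--                 else:
--                     v = '-' if last_polarity == '+' else '+'
--                     out.extend([v, '0', '0', v])
--                     last_polarity = v
--                 one_parity = 0
--                 pending = 0
--     out.extend(['0'] * pending)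
--     return out
-- ===== Notes on version B (the rewrite author's own statement) =====
-- stated objective: alternative
-- what changed: B buffers a pending-zero counter and flushes zeros lazily, emitting the B00V substitution directly, instead of A's append-three-zeros-then-pop-them-back backtracking on the output list.
import Mathlib
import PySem

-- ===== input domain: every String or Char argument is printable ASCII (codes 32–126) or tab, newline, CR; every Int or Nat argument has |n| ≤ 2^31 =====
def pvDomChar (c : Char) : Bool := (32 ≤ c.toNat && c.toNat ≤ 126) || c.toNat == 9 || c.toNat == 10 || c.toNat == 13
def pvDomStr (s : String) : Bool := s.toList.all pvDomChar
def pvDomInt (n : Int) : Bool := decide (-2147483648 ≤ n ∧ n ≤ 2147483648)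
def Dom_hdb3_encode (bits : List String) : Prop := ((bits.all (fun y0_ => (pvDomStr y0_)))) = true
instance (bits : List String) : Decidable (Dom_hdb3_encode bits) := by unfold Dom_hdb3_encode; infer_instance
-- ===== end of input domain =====

-- B replaces A's append-three-zeros-then-pop-them-back substitution by a pending-zero
-- counter that flushes buffered zeros lazily; same cost, no backtracking (objective: alternative).

-- ===== PORT A =====
-- literal loop of A: state (encoded_bits, last_polarity, one_parity, consecutive_zeros);
-- `pop` on the Python list end is `dropLast`.
def hdb3Loop (bits : List String) (enc : List String) (lp : String)
    (par : Int) (cz : Int) : List String :=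
  match bits with
  | [] => enc
  | bit :: rest =>
    if bit = "1" then
      let par' := PySem.Int.mod (par + 1) 2
      if lp = "+" then hdb3Loop rest (enc ++ ["-"]) "-" par' 0
      else hdb3Loop rest (enc ++ ["+"]) "+" par' 0
    else
      let cz' := cz + 1
      if cz' = 4 then
        if par = 1 then
          if lp = "+" then hdb3Loop rest (enc ++ ["+"]) lp 0 0
          else hdb3Loop rest (enc ++ ["-"]) lp 0 0
        else
          if lp = "+" then
            hdb3Loop rest (enc.dropLast.dropLast.dropLast ++ ["-", "0", "0", "-"]) "-" 0 0
          else
            hdb3Loop rest (enc.dropLast.dropLast.dropLast ++ ["+", "0", "0", "+"]) "+" 0 0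
      else hdb3Loop rest (enc ++ ["0"]) lp par cz'

def hdb3_encode (bits : List String) : List String :=
  hdb3Loop bits [] "-" 0 0

-- ===== PORT B =====
-- literal loop of B: zeros are buffered in `pend` and flushed on a '1' or at the end.
def hdb3AltLoop (bits : List String) (out : List String) (lp : String)
    (par : Int) (pend : Nat) : List String :=
  match bits with
  | [] => out ++ List.replicate pend "0"
  | bit :: rest =>
    if bit = "1" then
      let pulse := if lp = "+" then "-" else "+"
      hdb3AltLoop rest (out ++ List.replicate pend "0" ++ [pulse]) pulse (1 - par) 0
    else
      let pend' := pend + 1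
      if pend' = 4 then
        if par = 1 then
          hdb3AltLoop rest (out ++ ["0", "0", "0", lp]) lp 0 0
        else
          let v := if lp = "+" then "-" else "+"
          hdb3AltLoop rest (out ++ [v, "0", "0", v]) v 0 0
      else hdb3AltLoop rest out lp par pend'

def hdb3_encode_alt (bits : List String) : List String :=
  hdb3AltLoop bits [] "-" 0 0

-- ===== PRECONDITION & SPEC =====
def Spec_hdb3_encode (bits : List String) (out : List String) : Prop := out = hdb3_encode_alt bits
instance (bits : List String) (out : List String) : Decidable (Spec_hdb3_encode bits out) := by unfold Spec_hdb3_encode; infer_instance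

-- ===== CLAIM (what is proved, stated in full; the proofs are below) =====
def Claim_equal_hdb3_encode : Prop := ∀ (bits : List String), Dom_hdb3_encode bits → Spec_hdb3_encode bits (hdb3_encode bits)

-- ===== LEMMAS AND PROOFS =====

-- Invariant: A's encoded list is B's output plus the cz buffered zeros, with matching
-- last_polarity/one_parity and cz ≤ 3; both polarity and parity stay in their two-value ranges.
lemma hdb3_key : ∀ (bits acc : List String) (lp : String) (par : Int) (cz : Nat),
    (lp = "+" ∨ lp = "-") → (par = 0 ∨ par = 1) → cz ≤ 3 →
    hdb3Loop bits (acc ++ List.replicate cz "0") lp par (cz : Int) =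
      hdb3AltLoop bits acc lp par cz := by
  have h34 : ((3 : Nat) : Int) + 1 = 4 := by decide
  intro bits
  induction bits with
  | nil => intro acc lp par cz _ _ _; simp [hdb3Loop, hdb3AltLoop]
  | cons bit rest ih =>
    intro acc lp par cz hlp hpar hcz
    by_cases h1 : bit = "1"
    · have hpar' : PySem.Int.mod (par + 1) 2 = 1 - par := by
        rcases hpar with h | h <;> subst h <;> decide
      have hpar'' : (1 - par = 0 ∨ 1 - par = 1) := by omega
      rcases hlp with h | h <;> subst h
      · simp only [hdb3Loop, hdb3AltLoop, h1, hpar', reduceIte]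
        simpa using ih (acc ++ List.replicate cz "0" ++ ["-"]) "-" (1 - par) 0
          (Or.inr rfl) hpar'' (by omega)
      · simp only [hdb3Loop, hdb3AltLoop, h1, hpar', reduceIte]
        simpa using ih (acc ++ List.replicate cz "0" ++ ["+"]) "+" (1 - par) 0
          (Or.inl rfl) hpar'' (by omega)
    · by_cases h4 : cz = 3
      · subst h4
        have hdrop : ∀ l : List String,
            (l ++ List.replicate 3 "0").dropLast.dropLast.dropLast = l := by
          intro l
          show (l ++ ["0", "0", "0"]).dropLast.dropLast.dropLast = l
          rw [show l ++ ["0", "0", "0"] = ((l ++ ["0"]) ++ ["0"]) ++ ["0"] by simp]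
          rw [List.dropLast_concat, List.dropLast_concat, List.dropLast_concat]
        rcases hpar with hp | hp <;> subst hp
        · -- parity 0: substitution B00V, drops the three buffered zeros
          rcases hlp with h | h <;> subst h
          · simp only [hdb3Loop, hdb3AltLoop, h1, h34, reduceIte, hdrop]
            simpa using ih (acc ++ ["-", "0", "0", "-"]) "-" 0 0
              (Or.inr rfl) (Or.inl rfl) (by omega)
          · simp only [hdb3Loop, hdb3AltLoop, h1, h34, reduceIte, hdrop]
            simpa using ih (acc ++ ["+", "0", "0", "+"]) "+" 0 0
              (Or.inl rfl) (Or.inl rfl) (by omega)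
        · -- parity 1: zeros stay, violation pulse appended
          rcases hlp with h | h <;> subst h
          · simp only [hdb3Loop, hdb3AltLoop, h1, h34, reduceIte]
            have := ih (acc ++ ["0", "0", "0", "+"]) "+" 0 0
              (Or.inl rfl) (Or.inl rfl) (by omega)
            simpa [List.append_assoc, List.replicate] using this
          · simp only [hdb3Loop, hdb3AltLoop, h1, h34, reduceIte]
            have := ih (acc ++ ["0", "0", "0", "-"]) "-" 0 0
              (Or.inr rfl) (Or.inl rfl) (by omega)
            simpa [List.append_assoc, List.replicate] using this
      · have hne : ¬ ((cz : Int) + 1 = 4) := by omega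
        have hne' : ¬ (cz + 1 = 4) := by omega
        simp only [hdb3Loop, hdb3AltLoop, h1, hne, hne', if_false]
        have := ih acc lp par (cz + 1) hlp hpar (by omega)
        simpa only [List.replicate_succ' (n := cz), Nat.cast_add, Nat.cast_one,
          List.append_assoc] using this

-- ===== VERDICT (by name: the statement is the Claim_ definition above) =====
theorem hdb3_encode_spec : Claim_equal_hdb3_encode := by
  intro bits _
  unfold Spec_hdb3_encode hdb3_encode hdb3_encode_alt
  have := hdb3_key bits [] "-" 0 0 (Or.inr rfl) (Or.inl rfl) (by omega)
  simpa using this
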